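-- pv_equiv track=rewrite | github.com/JeremyKalfus/AutoMath | artifacts/r3-p10-three-color-path-ramsey/circulant_check.py | has_p10
-- ===== SOURCE A (Python) =====
-- from functools import lru_cache
--
-- TARGET = 10
--
-- def has_p10(adj_bits):
--     n = len(adj_bits)
--
--     @lru_cache(maxsize=None)
--     def dfs(v, used_mask, length):
--         if length >= TARGET:
--             return True
--         candidates = adj_bits[v] & ~used_mask
--         while candidates:
--             bit = candidates & -candidates
--             u = bit.bit_length() - 1
--             if dfs(u, used_mask | bit, length + 1):
--                 return True
--             candidates ^= bit
--         return False
--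
--     for start in range(n):
--         if dfs(start, 1 << start, 1):
--             return True
--     return False
-- ===== SOURCE B (Python) =====
-- TARGET = 10
--
-- def has_p10(adj_bits):
--     n = len(adj_bits)
--     vrange = (1 << n) - 1          # clip neighbour masks to the real vertices 0..n-1
--     stack = [(v, 1 << v, 1) for v in range(n)]
--     while stack:
--         v, mask, length = stack.pop()
--         if length >= TARGET:
--             return True
--         cand = adj_bits[v] & ~mask & vrange
--         while cand:
--             low = cand & -cand
--             cand ^= low
--             stack.append((low.bit_length() - 1, mask | low, length + 1))
--     return False
-- ===== Notes on version B (the rewrite author's own statement) =====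
-- stated objective: simpler
-- what changed: Replaces the memoized recursive DFS (nested lru_cache'd function, per-start recursion) with a single explicit-stack worklist loop carrying (vertex, mask, length) frames, no cache, with neighbour masks clipped to the real vertex range.
-- outside the precondition, e.g. on has_p10([-1, -1, -1, -1, -1, -1, -1, -1, -1, -1]): A returns True, B returns True; on has_p10([2, 4, 8, 16, 32, 64, 128, 256, 1048576]): A returns True, B returns False
import Mathlib
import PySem

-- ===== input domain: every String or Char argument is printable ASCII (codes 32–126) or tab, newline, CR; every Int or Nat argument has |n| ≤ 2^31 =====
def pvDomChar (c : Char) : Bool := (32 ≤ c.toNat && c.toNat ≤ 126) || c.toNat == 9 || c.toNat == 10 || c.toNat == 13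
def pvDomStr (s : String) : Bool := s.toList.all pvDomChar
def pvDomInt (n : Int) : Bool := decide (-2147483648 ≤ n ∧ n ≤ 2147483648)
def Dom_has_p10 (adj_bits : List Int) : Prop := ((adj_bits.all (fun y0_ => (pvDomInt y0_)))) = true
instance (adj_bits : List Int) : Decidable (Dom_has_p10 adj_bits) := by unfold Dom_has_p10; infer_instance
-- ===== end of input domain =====

-- B replaces A's memoized recursive DFS by a plain explicit-stack worklist loop (no cache); return values proved equal on Pre_.

-- ===== PORT A =====
-- shared helper: the Python `while candidates: bit = c & -c; u = bit.bit_length()-1; …; c ^= bit`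
-- loop enumerates the set-bit indices of a nonnegative candidate mask lowest-first; bitIndices is
-- exactly that lowbit-extraction loop (exact for the nonnegative masks admitted by Pre_).
theorem pv_land_pred_lt (c : Nat) (h : c ≠ 0) : c &&& (c - 1) < c :=
  Nat.lt_of_le_of_lt Nat.and_le_right (Nat.sub_lt (Nat.pos_of_ne_zero h) one_pos)

def bitIndices (c : Nat) : List Nat :=
  if h : c = 0 then []
  else (c - (c &&& (c - 1))).log2 :: bitIndices (c &&& (c - 1))
termination_by c
decreasing_by exact pv_land_pred_lt c h

-- A's inner dfs; `fuel = TARGET - length` (the `length >= TARGET` check is `fuel = 0`);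
-- `adj_bits[v] & ~used` on the nonnegative masks of Pre_ is `a - (a &&& used)`.
def dfsA (adj : List Int) (fuel : Nat) (v used : Nat) : Bool :=
  match fuel with
  | 0 => true
  | f + 1 =>
      let a := (adj.getD v 0).toNat
      (bitIndices (a - (a &&& used))).any (fun u => dfsA adj f u (used ||| (1 <<< u)))

def has_p10 (adj_bits : List Int) : Bool :=
  (List.range adj_bits.length).any (fun start => dfsA adj_bits 9 start (1 <<< start))

-- ===== PORT B =====
-- termination bound helpers for the worklist loop (cited in decreasing_by)
def Lof (adj : List Int) : Nat := (adj.map (fun a => a.toNat)).foldr max 0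

theorem pv_getD_toNat_le_Lof (adj : List Int) (v : Nat) : (adj.getD v 0).toNat ≤ Lof adj := by
  induction adj generalizing v with
  | nil => simp [Lof]
  | cons a tl ih =>
      have hL : Lof (a :: tl) = max a.toNat (Lof tl) := by simp [Lof]
      rw [hL]
      cases v with
      | zero => exact le_max_left _ _
      | succ v =>
          have hg : (a :: tl).getD (v + 1) 0 = tl.getD v 0 := by simp [List.getD]
          rw [hg]
          exact le_trans (ih v) (le_max_right _ _)

theorem pv_bitIndices_length_le (c : Nat) : (bitIndices c).length ≤ c := by
  induction c using Nat.strong_induction_on with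
  | _ c ih =>
      by_cases h : c = 0
      · simp [bitIndices, h]
      · rw [bitIndices, dif_neg h]
        have hlt := pv_land_pred_lt c h
        have := ih _ hlt
        simp only [List.length_cons]
        omega

theorem pv_sum_map_const {α : Type} (l : List α) (c : Nat) :
    (l.map (fun _ => c)).sum = l.length * c := by
  induction l with
  | nil => simp
  | cons a tl ih => simp [Nat.succ_mul, Nat.add_comm]

-- B: stack of (vertex, mask, length) frames, top at the head (= Python's end-of-list top:
-- the ascending-bit pushes followed by list.pop() appear as `…​.reverse ++ rest`).
def loopB (adj : List Int) (stack : List (Nat × Nat × Nat)) : Bool :=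
  match stack with
  | [] => false
  | (v, mask, d) :: rest =>
      if 10 ≤ d then true
      else
        let a := (adj.getD v 0).toNat
        -- `adj_bits[v] & ~mask & vrange` on the nonnegative masks of Pre_: clip to vertices 0..n-1
        let cand := (a - (a &&& mask)) &&& (2 ^ adj.length - 1)
        loopB adj (((bitIndices cand).map (fun u => (u, mask ||| (1 <<< u), d + 1))).reverse ++ rest)
termination_by (stack.map (fun f => (Lof adj + 2) ^ (10 - f.2.2))).sum
decreasing_by
  rename_i hd
  simp only [List.map_append, List.map_reverse, List.map_map, List.sum_append, List.sum_reverse,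
    List.map_cons, List.sum_cons, Function.comp_def]
  rw [pv_sum_map_const]
  have hlen : (bitIndices (((adj.getD v 0).toNat - ((adj.getD v 0).toNat &&& mask)) &&&
      (2 ^ adj.length - 1))).length ≤ Lof adj :=
    le_trans (pv_bitIndices_length_le _) (le_trans Nat.and_le_left
      (le_trans (Nat.sub_le _ _) (pv_getD_toNat_le_Lof adj v)))
  have he : 10 - d = (9 - d) + 1 := by omega
  have hpow : (Lof adj + 2) ^ (10 - d) = (Lof adj + 2) ^ (9 - d) * (Lof adj + 2) := by
    rw [he, pow_succ]
  have h1 : 10 - (d + 1) = 9 - d := by omega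
  rw [h1, hpow]
  have hpos : 0 < (Lof adj + 2) ^ (9 - d) := Nat.pow_pos (by omega)
  have : (bitIndices (((adj.getD v 0).toNat - ((adj.getD v 0).toNat &&& mask)) &&&
      (2 ^ adj.length - 1))).length *
      (Lof adj + 2) ^ (9 - d) < (Lof adj + 2) ^ (9 - d) * (Lof adj + 2) := by
    calc _ ≤ Lof adj * (Lof adj + 2) ^ (9 - d) := Nat.mul_le_mul_right _ hlen
      _ < (Lof adj + 2) * (Lof adj + 2) ^ (9 - d) := (Nat.mul_lt_mul_right hpos).mpr (by omega)
      _ = (Lof adj + 2) ^ (9 - d) * (Lof adj + 2) := Nat.mul_comm _ _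
  omega

def has_p10_alt (adj_bits : List Int) : Bool :=
  loopB adj_bits (((List.range adj_bits.length).map (fun v => (v, 1 <<< v, 1))).reverse)

-- ===== PRECONDITION & SPEC =====
-- Pre_ excludes adjacency masks that are negative (Python's two's-complement ints then offer
-- infinitely many neighbour bits, and A can diverge or return by accident of search order) and
-- masks with a set bit ≥ len(adj_bits), on which the programs in general raise IndexError;
-- where A still happens to return there, that value is an artefact of its start/bit order.
def Pre_has_p10 (adj_bits : List Int) : Prop :=
  ∀ x ∈ adj_bits, 0 ≤ x ∧ x < 2 ^ adj_bits.length
instance (adj_bits : List Int) : Decidable (Pre_has_p10 adj_bits) := by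
  unfold Pre_has_p10; infer_instance

def pvWitness_has_p10 : List Int := [1, 1]

def Spec_has_p10 (adj_bits : List Int) (out : Bool) : Prop := out = has_p10_alt adj_bits
instance (adj_bits : List Int) (out : Bool) : Decidable (Spec_has_p10 adj_bits out) := by
  unfold Spec_has_p10; infer_instance

-- ===== CLAIM (what is proved, stated in full; the proofs are below) =====
def Claim_equal_has_p10 : Prop := ∀ (adj_bits : List Int), Dom_has_p10 adj_bits → Pre_has_p10 adj_bits → Spec_has_p10 adj_bits (has_p10 adj_bits)

-- ===== LEMMAS AND PROOFS =====
theorem loopB_any (adj : List Int) (hP : ∀ w, (adj.getD w 0).toNat < 2 ^ adj.length)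
    (stack : List (Nat × Nat × Nat)) :
    loopB adj stack = stack.any (fun f => dfsA adj (10 - f.2.2) f.1 f.2.1) := by
  fun_induction loopB adj stack with
  | case1 => simp
  | case2 v mask d rest h =>
      have h0 : 10 - d = 0 := by omega
      simp [List.any_cons, h0, dfsA]
  | case3 v mask d rest h a cand ih =>
      rw [ih]
      have hclip : cand = a - (a &&& mask) :=
        Nat.and_two_pow_sub_one_of_lt_two_pow
          (Nat.lt_of_le_of_lt (Nat.sub_le _ _) (hP v))
      have he : 10 - d = (9 - d) + 1 := by omega
      have h1 : 10 - (d + 1) = 9 - d := by omega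
      simp only [List.any_append, List.any_reverse, List.any_map, List.any_cons, Function.comp_def,
        h1, he, dfsA, hclip]
      rfl

-- ===== VERDICT (by name: the statement is the Claim_ definition above) =====
theorem has_p10_spec : Claim_equal_has_p10 := by
  intro adj _ hpre
  have hP : ∀ w, (adj.getD w 0).toNat < 2 ^ adj.length := by
    intro w
    by_cases hw : w < adj.length
    · have hmem := hpre (adj.getD w 0) (by
        rw [List.getD_eq_getElem adj 0 hw]
        exact List.getElem_mem hw)
      have h2 : ((2 : Int) ^ adj.length) = ((2 ^ adj.length : Nat) : Int) := by push_cast; ring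
      omega
    · rw [List.getD_eq_default adj 0 (by omega)]
      simp only [Int.toNat_zero]
      exact Nat.pow_pos (by omega)
  unfold Spec_has_p10 has_p10 has_p10_alt
  rw [loopB_any adj hP]
  simp only [List.any_reverse, List.any_map]
  rfl
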